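-- pv_equiv track=rewrite | github.com/andyparfei/andyparfei | embed_portrait.py | trim_background
-- ===== SOURCE A (Python) =====
-- def trim_background(
--     grid: list[list[tuple[tuple[int, int, int], str]]],
--     bg_threshold: int = 15,
-- ) -> list[list[tuple[tuple[int, int, int], str]]]:
--     """Remove trailing near-black cells from each row."""
--     trimmed = []
--     for row in grid:
--         last_visible = -1
--         for i, (rgb, _) in enumerate(row):
--             if sum(rgb) > bg_threshold:
--                 last_visible = i
--         trimmed.append(row[: last_visible + 1] if last_visible >= 0 else [])
--     # Also trim trailing empty rows
--     while trimmed and not trimmed[-1]: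
--         trimmed.pop()
--     return trimmed
-- ===== SOURCE B (Python) =====
-- def trim_background(
--     grid: list[list[tuple[tuple[int, int, int], str]]],
--     bg_threshold: int = 15,
-- ) -> list[list[tuple[tuple[int, int, int], str]]]:
--     """Remove trailing near-black cells from each row (one shared right-strip helper)."""
--     def rstrip(xs, keep):
--         ys = xs[::-1]
--         while ys and not keep(ys[0]):
--             ys = ys[1:]
--         return ys[::-1]
--     rows = [rstrip(row, lambda cell: sum(cell[0]) > bg_threshold) for row in grid]
--     return rstrip(rows, lambda row: len(row) > 0)
-- ===== Notes on version B (the rewrite author's own statement) =====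
-- stated objective: simpler
-- what changed: Replaces the forward enumerate-scan that tracks the last visible index plus a slice, and the separate while-pop of trailing empty rows, by one shared right-strip helper (reverse, drop leading rejected elements, reverse) applied at both levels.
import Mathlib
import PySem

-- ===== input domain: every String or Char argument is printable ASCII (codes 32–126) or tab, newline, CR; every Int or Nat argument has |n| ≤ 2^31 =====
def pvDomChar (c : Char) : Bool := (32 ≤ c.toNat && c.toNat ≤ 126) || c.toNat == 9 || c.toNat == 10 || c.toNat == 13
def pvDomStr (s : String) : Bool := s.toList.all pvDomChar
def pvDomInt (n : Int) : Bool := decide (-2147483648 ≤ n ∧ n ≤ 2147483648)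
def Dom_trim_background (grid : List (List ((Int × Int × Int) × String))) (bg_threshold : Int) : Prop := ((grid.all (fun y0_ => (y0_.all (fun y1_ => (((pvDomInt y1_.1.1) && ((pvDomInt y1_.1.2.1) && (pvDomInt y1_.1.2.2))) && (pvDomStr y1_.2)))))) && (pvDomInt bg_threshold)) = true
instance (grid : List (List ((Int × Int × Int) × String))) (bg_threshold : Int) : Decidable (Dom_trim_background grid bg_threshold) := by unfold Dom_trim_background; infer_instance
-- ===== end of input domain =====

-- B uses one shared right-strip helper at both levels instead of A's forward last-visible scan + slice and while-pop; objective: simpler.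

-- ===== PORT A =====
-- inner loop: for i, (rgb, _) in enumerate(row): if sum(rgb) > bg_threshold: last_visible = i
def pvLastVis (bg_threshold : Int) (row : List ((Int × Int × Int) × String)) : Int :=
  (PySem.List.enumerate row 0).foldl
    (fun lv p => if p.2.1.1 + p.2.1.2.1 + p.2.1.2.2 > bg_threshold then p.1 else lv) (-1)

-- while trimmed and not trimmed[-1]: trimmed.pop()
def pvWhilePop (xs : List (List ((Int × Int × Int) × String))) : List (List ((Int × Int × Int) × String)) :=
  if h : xs ≠ [] ∧ xs.getLast? = some [] then pvWhilePop xs.dropLast else xs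
termination_by xs.length
decreasing_by
  cases xs with
  | nil => exact absurd rfl h.1
  | cons a as => simp

def trim_background (grid : List (List ((Int × Int × Int) × String))) (bg_threshold : Int) : List (List ((Int × Int × Int) × String)) :=
  let trimmed := grid.foldl
    (fun acc row =>
      let last_visible := pvLastVis bg_threshold row
      acc ++ [if last_visible ≥ 0 then PySem.List.slice row none (some (last_visible + 1)) else []]) []
  pvWhilePop trimmed

-- ===== PORT B =====
-- Source B's rstrip: ys = xs[::-1]; while ys and not keep(ys[0]): ys = ys[1:]; return ys[::-1]
def pvGo {α : Type} (keep : α → Bool) : List α → List α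
  | [] => []
  | y :: ys => if keep y then y :: ys else pvGo keep ys

def pvRstrip {α : Type} (keep : α → Bool) (xs : List α) : List α :=
  (pvGo keep xs.reverse).reverse

def trim_background_alt (grid : List (List ((Int × Int × Int) × String))) (bg_threshold : Int) : List (List ((Int × Int × Int) × String)) :=
  pvRstrip (fun row => decide (row.length > 0))
    (grid.map (fun row => pvRstrip (fun c => decide (c.1.1 + c.1.2.1 + c.1.2.2 > bg_threshold)) row))

-- ===== PRECONDITION & SPEC =====
def Spec_trim_background (grid : List (List ((Int × Int × Int) × String))) (bg_threshold : Int) (out : List (List ((Int × Int × Int) × String))) : Prop := out = trim_background_alt grid bg_threshold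
instance (grid : List (List ((Int × Int × Int) × String))) (bg_threshold : Int) (out : List (List ((Int × Int × Int) × String))) : Decidable (Spec_trim_background grid bg_threshold out) := by unfold Spec_trim_background; infer_instance

-- ===== CLAIM (what is proved, stated in full; the proofs are below) =====
def Claim_equal_trim_background : Prop := ∀ (grid : List (List ((Int × Int × Int) × String))) (bg_threshold : Int), Dom_trim_background grid bg_threshold → Spec_trim_background grid bg_threshold (trim_background grid bg_threshold)

-- ===== LEMMAS AND PROOFS =====

theorem pvLastVis_append (th : Int) (xs : List ((Int × Int × Int) × String)) (x : (Int × Int × Int) × String) :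
    pvLastVis th (xs ++ [x]) =
      if x.1.1 + x.1.2.1 + x.1.2.2 > th then (xs.length : Int) else pvLastVis th xs := by
  simp [pvLastVis, PySem.List.enumerate_append, List.foldl_append, PySem.List.enumerate]

theorem pvLastVis_bounds (th : Int) (xs : List ((Int × Int × Int) × String)) :
    -1 ≤ pvLastVis th xs ∧ pvLastVis th xs < xs.length := by
  induction xs using List.reverseRecOn with
  | nil => simp [pvLastVis, PySem.List.enumerate]
  | append_singleton ys y ih =>
      rw [pvLastVis_append]
      split_ifs <;> simp <;> omega

-- A's per-row result equals B's rstrip of the row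
theorem row_eq (th : Int) (row : List ((Int × Int × Int) × String)) :
    (if pvLastVis th row ≥ 0 then PySem.List.slice row none (some (pvLastVis th row + 1)) else []) =
      pvRstrip (fun c => decide (c.1.1 + c.1.2.1 + c.1.2.2 > th)) row := by
  induction row using List.reverseRecOn with
  | nil => simp [pvLastVis, PySem.List.enumerate, pvRstrip, pvGo]
  | append_singleton xs x ih =>
      rw [pvLastVis_append]
      by_cases hx : x.1.1 + x.1.2.1 + x.1.2.2 > th
      · have hlen : ((xs.length : Int) + 1) = ((xs.length + 1 : Nat) : Int) := by push_cast; ring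
        simp only [hx, if_pos, if_true]
        rw [if_pos (by positivity), hlen, PySem.List.slice_to_natCast]
        simp [pvRstrip, pvGo, hx]
      · have hb := pvLastVis_bounds th xs
        simp only [hx, if_false, if_neg hx]
        have hrs : pvRstrip (fun c => decide (c.1.1 + c.1.2.1 + c.1.2.2 > th)) (xs ++ [x]) =
            pvRstrip (fun c => decide (c.1.1 + c.1.2.1 + c.1.2.2 > th)) xs := by
          simp [pvRstrip, pvGo, hx]
        rw [hrs, ← ih]
        by_cases h0 : pvLastVis th xs ≥ 0
        · rw [if_pos h0, if_pos h0]
          rw [PySem.List.slice_to (xs := xs ++ [x]) (b := pvLastVis th xs + 1) (by omega),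
              PySem.List.slice_to (xs := xs) (b := pvLastVis th xs + 1) (by omega)]
          rw [List.take_append_of_le_length (by omega)]
        · rw [if_neg h0, if_neg h0]

-- the foldl-append accumulation is a map
theorem foldl_build (f : List ((Int × Int × Int) × String) → List ((Int × Int × Int) × String))
    (grid : List (List ((Int × Int × Int) × String))) (acc : List (List ((Int × Int × Int) × String))) :
    grid.foldl (fun acc row => acc ++ [f row]) acc = acc ++ grid.map f := by
  induction grid generalizing acc with
  | nil => simp
  | cons g gs ih => simp [List.foldl_cons, ih]

-- the while-pop of trailing empty rows is B's rstrip at the row level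
theorem whilePop_eq (xs : List (List ((Int × Int × Int) × String))) :
    pvWhilePop xs = pvRstrip (fun row => decide (row.length > 0)) xs := by
  induction xs using List.reverseRecOn with
  | nil => rw [pvWhilePop]; simp [pvRstrip, pvGo]
  | append_singleton ys y ih =>
      rw [pvWhilePop]
      by_cases hy : y = []
      · subst hy
        rw [dif_pos (by simp)]
        simpa [pvRstrip, pvGo] using ih
      · rw [dif_neg (by simp [hy])]
        have : (0 < y.length) := List.length_pos_iff.mpr hy
        simp [pvRstrip, pvGo, this]

-- ===== VERDICT (by name: the statement is the Claim_ definition above) =====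
theorem trim_background_spec : Claim_equal_trim_background := by
  intro grid th _
  show trim_background grid th = trim_background_alt grid th
  unfold trim_background trim_background_alt
  rw [foldl_build (fun row => if pvLastVis th row ≥ 0 then PySem.List.slice row none (some (pvLastVis th row + 1)) else []) grid []]
  rw [List.nil_append, whilePop_eq]
  congr 1
  exact List.map_congr_left (fun row _ => row_eq th row)
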